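-- pv_equiv track=rewrite | github.com/ty-anderson/wws_api | wws_api/process_data.py | _next_tags
-- ===== SOURCE A (Python) =====
-- def _next_tags(tags: list, curr_tag: str) -> list:
--     """
--     Get next tags to search for in xml. Used for nested elements.
--     """
--     activated = False
--     tmp_tags = []
--     for tmp_tag in tags:
--         if activated:
--             tmp_tags.append(tmp_tag)
--         if tmp_tag == curr_tag and not activated:
--             activated = True
--     return tmp_tags
-- ===== SOURCE B (Python) =====
-- def _next_tags(tags: list, curr_tag: str) -> list:
--     """
--     Get next tags to search for in xml. Used for nested elements.
--     """
--     if curr_tag in tags: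
--         return tags[tags.index(curr_tag) + 1:]
--     return []
-- ===== Notes on version B (the rewrite author's own statement) =====
-- stated objective: simpler
-- what changed: B replaces the flagged element-by-element loop with a membership test, index lookup and a suffix slice.
import Mathlib
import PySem

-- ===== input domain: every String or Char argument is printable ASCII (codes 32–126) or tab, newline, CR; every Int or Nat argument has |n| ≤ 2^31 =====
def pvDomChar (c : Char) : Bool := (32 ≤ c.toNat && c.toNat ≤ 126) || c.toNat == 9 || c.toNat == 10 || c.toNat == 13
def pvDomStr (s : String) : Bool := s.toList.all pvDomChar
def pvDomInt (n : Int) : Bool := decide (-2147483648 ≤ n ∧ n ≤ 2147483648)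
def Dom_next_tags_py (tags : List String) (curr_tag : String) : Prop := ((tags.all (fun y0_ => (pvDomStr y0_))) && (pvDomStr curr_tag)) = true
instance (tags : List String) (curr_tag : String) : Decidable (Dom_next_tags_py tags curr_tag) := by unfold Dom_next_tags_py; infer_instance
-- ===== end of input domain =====

-- B finds the first occurrence with a membership test + index and returns the suffix slice,
-- instead of A's flagged element-by-element appending loop (objective: simpler).

-- ===== PORT A =====
-- one loop iteration of A: first the 'if activated: append', then the 'if tmp_tag == curr_tag and not activated' flag update
def nextTagsStep (curr_tag : String) (s : Bool × List String) (tmp_tag : String) : Bool × List String :=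
  let s1 := if s.1 then (s.1, s.2 ++ [tmp_tag]) else s
  if tmp_tag == curr_tag && !s1.1 then (true, s1.2) else s1

def next_tags_py (tags : List String) (curr_tag : String) : List String :=
  (tags.foldl (nextTagsStep curr_tag) (false, [])).2

-- ===== PORT B =====
def next_tags_py_alt (tags : List String) (curr_tag : String) : List String :=
  if curr_tag ∈ tags then
    match PySem.List.index? tags curr_tag with
    | some i => PySem.List.slice tags (some ((i : Int) + 1)) none
    | none => []
  else []

-- ===== PRECONDITION & SPEC =====
def Spec_next_tags_py (tags : List String) (curr_tag : String) (out : List String) : Prop := out = next_tags_py_alt tags curr_tag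
instance (tags : List String) (curr_tag : String) (out : List String) : Decidable (Spec_next_tags_py tags curr_tag out) := by unfold Spec_next_tags_py; infer_instance

-- ===== CLAIM (what is proved, stated in full; the proofs are below) =====
def Claim_equal_next_tags_py : Prop := ∀ (tags : List String) (curr_tag : String), Dom_next_tags_py tags curr_tag → Spec_next_tags_py tags curr_tag (next_tags_py tags curr_tag)

-- ===== LEMMAS AND PROOFS =====

-- once the flag is set, A's loop appends every remaining element
theorem nextTags_loop_active (curr_tag : String) (l : List String) (acc : List String) :
    l.foldl (nextTagsStep curr_tag) (true, acc) = (true, acc ++ l) := by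
  induction l generalizing acc with
  | nil => simp
  | cons t ts ih => simp [nextTagsStep, ih]

-- while curr_tag has not been seen, A's loop leaves the state unchanged
theorem nextTags_loop_inactive (curr_tag : String) (l : List String) (h : curr_tag ∉ l)
    (acc : List String) :
    l.foldl (nextTagsStep curr_tag) (false, acc) = (false, acc) := by
  induction l with
  | nil => simp
  | cons t ts ih =>
    simp only [List.mem_cons, not_or] at h
    simp only [List.foldl_cons, nextTagsStep]
    have ht : (t == curr_tag) = false := by
      simp [beq_eq_false_iff_ne]; exact fun e => h.1 e.symm
    simp [ht]
    exact ih h.2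

theorem next_tags_main (tags : List String) (curr_tag : String) :
    next_tags_py tags curr_tag = next_tags_py_alt tags curr_tag := by
  induction tags with
  | nil => simp [next_tags_py, next_tags_py_alt]
  | cons t ts ih =>
    by_cases hm : t = curr_tag
    · subst hm
      simp only [next_tags_py, List.foldl_cons, nextTagsStep]
      simp only [next_tags_py_alt, List.mem_cons, true_or, if_pos, beq_self_eq_true]
      rw [PySem.List.index?_cons_self]
      simp [nextTags_loop_active, PySem.List.slice_from_one]
    · simp only [next_tags_py, List.foldl_cons, nextTagsStep]
      have ht : (t == curr_tag) = false := by simp [hm]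
      simp only [ht, Bool.false_and, Bool.false_eq_true, if_false]
      by_cases hmem : curr_tag ∈ ts
      · have : next_tags_py ts curr_tag = next_tags_py_alt ts curr_tag := ih
        simp only [next_tags_py] at this
        simp only [next_tags_py_alt, hmem, if_pos] at this ⊢
        have hmem' : curr_tag ∈ t :: ts := List.mem_cons_of_mem _ hmem
        rw [if_pos hmem']
        rw [PySem.List.index?_cons_of_ne (xs := ts) hm]
        obtain ⟨i, hi⟩ := (PySem.List.index?_isSome_iff (xs := ts) (v := curr_tag)).2 hmem
          |> Option.isSome_iff_exists.mp
        rw [hi] at this ⊢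
        have this' : (List.foldl (nextTagsStep curr_tag) (false, ([] : List String)) ts).2
            = PySem.List.slice ts (some ((i : Int) + 1)) none := this
        rw [PySem.List.slice_from (xs := ts) (a := (i : Int) + 1) (by omega)] at this'
        show (List.foldl (nextTagsStep curr_tag) (false, []) ts).2
            = PySem.List.slice (t :: ts) (some (((i + 1 : Nat) : Int) + 1)) none
        rw [PySem.List.slice_from (xs := t :: ts) (a := ((i + 1 : Nat) : Int) + 1) (by omega), this']
        have h1 : ((i : Int) + 1).toNat = i + 1 := by omega
        have h2 : (((i + 1 : Nat) : Int) + 1).toNat = i + 2 := by omega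
        rw [h1, h2]
        simp [List.drop]
      · rw [nextTags_loop_inactive curr_tag ts hmem]
        have : curr_tag ∉ t :: ts := by
          simp [List.mem_cons, not_or]; exact ⟨fun e => hm e.symm, hmem⟩
        simp [next_tags_py_alt, this]

-- ===== VERDICT (by name: the statement is the Claim_ definition above) =====
theorem next_tags_py_spec : Claim_equal_next_tags_py := by
  intro tags curr_tag _
  unfold Spec_next_tags_py
  exact next_tags_main tags curr_tag
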